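-- pv_equiv track=rewrite | github.com/goerz/dissertation | chapters/transmon/rip_entanglement.py | arg_first_extr
-- ===== SOURCE A (Python) =====
-- def arg_first_extr(a):
--     """
--     Given an array a, return the index of the first local maximum in a
--     """
--     i_last = len(a)-1
--     for i, val in enumerate(a):
--         if i == 0:
--             continue
--         if i == i_last:
--             return i
--         if a[i-1] < val > a[i+1]:
--             return i
--         if a[i-1] > val < a[i+1]:
--             return i
-- ===== SOURCE B (Python) =====
-- def arg_first_extr(a):
--     """
--     Given an array a, return the index of the first local maximum in a
--     """
--     n = len(a)
--     if n < 2: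
--         return None
--     best = n - 1
--     for i in range(n - 2, 0, -1):
--         if a[i-1] < a[i] > a[i+1] or a[i-1] > a[i] < a[i+1]:
--             best = i
--     return best
-- ===== Notes on version B (the rewrite author's own statement) =====
-- stated objective: alternative
-- what changed: B iterates the interior indices in REVERSE order (range(n-2, 0, -1)) maintaining a 'best' accumulator initialised to n-1 and overwriting it at every strict extremum so the leftmost one survives, then returns the accumulator once after the loop; A walks enumerate(a) left-to-right and returns early from inside the loop, with the last-index fallback interleaved as a loop branch.
import Mathlib
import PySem

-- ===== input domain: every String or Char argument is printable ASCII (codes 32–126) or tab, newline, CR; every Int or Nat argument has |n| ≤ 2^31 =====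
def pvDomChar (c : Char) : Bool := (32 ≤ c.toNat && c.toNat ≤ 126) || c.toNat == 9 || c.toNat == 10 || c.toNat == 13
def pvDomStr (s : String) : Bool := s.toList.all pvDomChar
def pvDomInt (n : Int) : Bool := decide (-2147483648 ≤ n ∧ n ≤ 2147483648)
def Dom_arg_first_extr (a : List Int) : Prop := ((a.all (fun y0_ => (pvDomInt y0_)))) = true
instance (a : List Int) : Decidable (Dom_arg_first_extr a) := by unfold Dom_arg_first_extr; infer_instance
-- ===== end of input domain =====

-- B replaces A's early-returning forward walk by a reverse iteration over the interior
-- indices with a 'best' accumulator (leftmost extremum survives by overwriting);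
-- same O(n) cost, a different iteration direction and control structure (objective: alternative).

-- ===== PORT A =====
-- loop body of A over enumerate(a); a[i-1] / a[i+1] via pyGetD (always in range here:
-- they are only read when 1 ≤ i < i_last, so no IndexError is possible)
def goA (a : List Int) (iLast : Int) : List (Int × Int) → Option Int
  | [] => none
  | (i, val) :: rest =>
    if i = 0 then goA a iLast rest
    else if i = iLast then some i
    else if PySem.List.pyGetD a (i - 1) 0 < val ∧ val > PySem.List.pyGetD a (i + 1) 0 then some i
    else if PySem.List.pyGetD a (i - 1) 0 > val ∧ val < PySem.List.pyGetD a (i + 1) 0 then some i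
    else goA a iLast rest

def arg_first_extr (a : List Int) : Option Int :=
  goA a ((a.length : Int) - 1) (PySem.List.enumerate a 0)

-- ===== PORT B =====
-- for i in range(n-2, 0, -1): best := i whenever a[i-1],a[i],a[i+1] is a strict extremum;
-- indices are always in range (1 ≤ i ≤ n-2), so pyGetD is exact
def arg_first_extr_alt (a : List Int) : Option Int :=
  let n : Int := (a.length : Int)
  if n < 2 then none
  else
    some ((PySem.List.pyRange (n - 2) 0 (-1)).foldl
      (fun best i =>
        if (PySem.List.pyGetD a (i - 1) 0 < PySem.List.pyGetD a i 0 ∧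
              PySem.List.pyGetD a (i + 1) 0 < PySem.List.pyGetD a i 0) ∨
           (PySem.List.pyGetD a i 0 < PySem.List.pyGetD a (i - 1) 0 ∧
              PySem.List.pyGetD a i 0 < PySem.List.pyGetD a (i + 1) 0)
        then i else best)
      (n - 1))

-- ===== PRECONDITION & SPEC =====
def Spec_arg_first_extr (a : List Int) (out : Option Int) : Prop := out = arg_first_extr_alt a
instance (a : List Int) (out : Option Int) : Decidable (Spec_arg_first_extr a out) := by unfold Spec_arg_first_extr; infer_instance

-- ===== CLAIM =====
def Claim_equal_arg_first_extr : Prop := ∀ (a : List Int), Dom_arg_first_extr a → Spec_arg_first_extr a (arg_first_extr a)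

-- ===== LEMMAS AND PROOFS =====

-- common characterisation: first interior strict extremum, else the last index (n ≥ 2), else none
def specF : List Int → Option Int
  | x :: y :: z :: rest =>
      if (x < y ∧ z < y) ∨ (y < x ∧ y < z) then some 1
      else (specF (y :: z :: rest)).map (· + 1)
  | [_, _] => some 1
  | _ => none

-- the extremum test of B as a Boolean predicate (proof helper)
def Q (a : List Int) (i : Int) : Bool :=
  decide ((PySem.List.pyGetD a (i - 1) 0 < PySem.List.pyGetD a i 0 ∧
            PySem.List.pyGetD a (i + 1) 0 < PySem.List.pyGetD a i 0) ∨
          (PySem.List.pyGetD a i 0 < PySem.List.pyGetD a (i - 1) 0 ∧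
            PySem.List.pyGetD a i 0 < PySem.List.pyGetD a (i + 1) 0))

lemma pyGetD_cons_natCast (x : Int) (l : List Int) (k : Nat) :
    PySem.List.pyGetD (x :: l) ((k : Int) + 1) 0 = PySem.List.pyGetD l (k : Int) 0 := by
  have h1 : ((k : Int) + 1) = ((k + 1 : Nat) : Int) := by push_cast; ring
  rw [h1, PySem.List.pyGetD_natCast, PySem.List.pyGetD_natCast, List.getD_cons_succ]

-- shifting a by one cons shifts goA's result by one, on any enumerate suffix starting at p ≥ 1
lemma goA_shift (x : Int) (l : List Int) :
    ∀ (t : List Int) (p : Nat), 1 ≤ p → t = l.drop p →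
    goA (x :: l) (l.length : Int) (PySem.List.enumerate t ((p : Int) + 1))
      = (goA l ((l.length : Int) - 1) (PySem.List.enumerate t (p : Int))).map (· + 1) := by
  intro t
  induction t with
  | nil => intro p _ _; simp [PySem.List.enumerate_nil, goA]
  | cons v t' ih =>
    intro p hp ht
    have hlen : p < l.length := by
      by_contra h
      rw [List.drop_eq_nil_of_le (by omega)] at ht
      exact List.cons_ne_nil v t' ht
    have hdrop : t' = l.drop (p + 1) := by
      have h : (l.drop p).tail = l.drop (p + 1) := List.tail_drop ..
      rw [← ht, List.tail_cons] at h
      exact h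
    rw [PySem.List.enumerate_cons, PySem.List.enumerate_cons]
    by_cases hlast : (p : Int) = (l.length : Int) - 1
    · simp only [goA]
      rw [if_neg (by omega : ¬((p : Int) + 1 = 0)), if_neg (by omega : ¬((p : Int) = 0)),
        if_pos (by omega : (p : Int) + 1 = (l.length : Int)), if_pos hlast]
      simp
    · simp only [goA]
      rw [if_neg (by omega : ¬((p : Int) + 1 = 0)), if_neg (by omega : ¬((p : Int) = 0)),
        if_neg (by omega : ¬((p : Int) + 1 = (l.length : Int))), if_neg hlast]
      have e1 : PySem.List.pyGetD (x :: l) ((p : Int) + 1 - 1) 0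
          = PySem.List.pyGetD l ((p : Int) - 1) 0 := by
        rw [show ((p : Int) + 1 - 1) = ((p - 1 : Nat) : Int) + 1 by omega,
          show ((p : Int) - 1) = ((p - 1 : Nat) : Int) by omega, pyGetD_cons_natCast]
      have e2 : PySem.List.pyGetD (x :: l) ((p : Int) + 1 + 1) 0
          = PySem.List.pyGetD l ((p : Int) + 1) 0 := by
        rw [show ((p : Int) + 1 + 1) = ((p + 1 : Nat) : Int) + 1 by push_cast; ring,
          show ((p : Int) + 1) = ((p + 1 : Nat) : Int) by push_cast; ring, pyGetD_cons_natCast]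
      rw [e1, e2]
      split_ifs with c1 c2
      · simp
      · simp
      · have hrec := ih (p + 1) (by omega) hdrop
        push_cast at hrec ⊢
        exact hrec

lemma A_eq_spec : ∀ a : List Int, arg_first_extr a = specF a := by
  intro a
  induction a with
  | nil => simp [arg_first_extr, PySem.List.enumerate_nil, goA, specF]
  | cons x l ih =>
    match l, ih with
    | [], _ =>
      simp [arg_first_extr, PySem.List.enumerate_cons, PySem.List.enumerate_nil, goA, specF]
    | [y], _ =>
      simp [arg_first_extr, PySem.List.enumerate_cons, PySem.List.enumerate_nil, goA, specF]
    | y :: z :: rest, ih =>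
      have hA : arg_first_extr (y :: z :: rest)
          = goA (y :: z :: rest) ((rest.length : Int) + 1)
              ((1, z) :: PySem.List.enumerate rest 2) := by
        unfold arg_first_extr
        rw [PySem.List.enumerate_cons]
        simp only [goA]
        norm_num
        simp only [goA]
        norm_num
      have hshift := goA_shift x (y :: z :: rest) (z :: rest) 1 (by omega) (by simp)
      norm_num at hshift
      unfold arg_first_extr
      rw [PySem.List.enumerate_cons, PySem.List.enumerate_cons]
      simp only [goA]
      norm_num
      rw [if_neg (by omega : ¬((rest.length : Int) + 1 = 0))]
      have e2 : PySem.List.pyGetD (x :: y :: z :: rest) 2 0 = z := by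
        rw [show (2 : Int) = ((1 : Nat) : Int) + 1 by norm_num, pyGetD_cons_natCast]
        simp [PySem.List.pyGetD_ofNat']
      rw [e2, hshift, ← hA, ih]
      simp only [specF]
      by_cases hc : (x < y ∧ z < y) ∨ (y < x ∧ y < z)
      · rcases hc with ⟨h1, h2⟩ | ⟨h1, h2⟩
        · rw [if_pos (⟨h1, h2⟩ : x < y ∧ z < y), if_pos (Or.inl ⟨h1, h2⟩)]
        · rw [if_neg (by omega : ¬(x < y ∧ z < y)), if_pos (⟨h1, h2⟩ : y < x ∧ y < z),
            if_pos (Or.inr ⟨h1, h2⟩)]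
      · rw [if_neg (by omega : ¬(x < y ∧ z < y)), if_neg (by omega : ¬(y < x ∧ y < z)),
          if_neg hc]

-- a 'keep the last hit' fold equals find? on the reversed list
lemma foldl_pick (P : Int → Bool) : ∀ (l : List Int) (init : Int),
    l.foldl (fun best i => if P i then i else best) init
      = (l.reverse.find? P).getD init := by
  intro l
  induction l with
  | nil => intro init; simp
  | cons x l ih =>
    intro init
    rw [List.foldl_cons, ih, List.reverse_cons, List.find?_append]
    cases h : l.reverse.find? P with
    | some j => simp
    | none =>
      cases hx : P x <;> simp [List.find?, hx]

-- the extremum test only looks at positions i-1, i, i+1, so it shifts across a cons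
lemma Q_shift (x : Int) (l : List Int) (i : Int) (hi : 1 ≤ i) :
    Q (x :: l) (i + 1) = Q l i := by
  obtain ⟨k, rfl⟩ : ∃ k : Nat, i = (k : Int) := ⟨i.toNat, by omega⟩
  have e0 : PySem.List.pyGetD (x :: l) ((k : Int) + 1) 0 = PySem.List.pyGetD l (k : Int) 0 :=
    pyGetD_cons_natCast x l k
  have e1 : PySem.List.pyGetD (x :: l) ((k : Int) + 1 - 1) 0
      = PySem.List.pyGetD l ((k : Int) - 1) 0 := by
    rw [show ((k : Int) + 1 - 1) = ((k - 1 : Nat) : Int) + 1 by omega,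
      show ((k : Int) - 1) = ((k - 1 : Nat) : Int) by omega, pyGetD_cons_natCast]
  have e2 : PySem.List.pyGetD (x :: l) ((k : Int) + 1 + 1) 0
      = PySem.List.pyGetD l ((k : Int) + 1) 0 := by
    rw [show ((k : Int) + 1 + 1) = ((k + 1 : Nat) : Int) + 1 by push_cast; ring,
      show ((k : Int) + 1) = ((k + 1 : Nat) : Int) by push_cast; ring, pyGetD_cons_natCast]
  unfold Q
  rw [e0, e1, e2]

-- find? over a shifted interior range shifts by one across a cons
lemma find_shift (x : Int) (l : List Int) : ∀ (n : Nat) (s : Int), 1 ≤ s →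
    (PySem.List.pyRange (s + 1) (s + 1 + n) 1).find? (Q (x :: l))
      = ((PySem.List.pyRange s (s + n) 1).find? (Q l)).map (· + 1) := by
  intro n
  induction n with
  | zero =>
    intro s _
    rw [show s + 1 + ((0 : Nat) : Int) = s + 1 by push_cast; ring,
      show s + ((0 : Nat) : Int) = s by push_cast; ring,
      PySem.List.pyRange_one_eq_nil le_rfl, PySem.List.pyRange_one_eq_nil le_rfl]
    simp
  | succ m ih =>
    intro s hs
    rw [show s + 1 + ((m + 1 : Nat) : Int) = s + 1 + (m : Int) + 1 by push_cast; ring,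
      show s + ((m + 1 : Nat) : Int) = s + (m : Int) + 1 by push_cast; ring]
    rw [PySem.List.pyRange_one_cons (show s + 1 < s + 1 + (m : Int) + 1 by omega),
      PySem.List.pyRange_one_cons (show s < s + (m : Int) + 1 by omega)]
    rw [List.find?_cons, List.find?_cons, Q_shift x l s hs]
    cases hq : Q l s with
    | true => simp
    | false =>
      have h2 := ih (s + 1) (by omega)
      rw [show s + 1 + (m : Int) = s + (m : Int) + 1 by ring] at h2
      rw [show s + 1 + 1 + (m : Int) = s + 1 + (m : Int) + 1 by ring] at h2
      exact h2

-- B in find?-over-range form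
lemma B_find (a : List Int) (h : 2 ≤ a.length) :
    arg_first_extr_alt a
      = some (((PySem.List.pyRange 1 ((a.length : Int) - 1) 1).find? (Q a)).getD
          ((a.length : Int) - 1)) := by
  unfold arg_first_extr_alt
  rw [if_neg (by push_cast; omega)]
  rw [show (PySem.List.pyRange ((a.length : Int) - 2) 0 (-1))
        = (PySem.List.pyRange 1 ((a.length : Int) - 1) 1).reverse by
      rw [PySem.List.pyRange_neg_one_eq_reverse, show (0 : Int) + 1 = 1 by norm_num,
        show (a.length : Int) - 2 + 1 = (a.length : Int) - 1 by ring]]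
  have hfun : (fun (best i : Int) =>
      if (PySem.List.pyGetD a (i - 1) 0 < PySem.List.pyGetD a i 0 ∧
            PySem.List.pyGetD a (i + 1) 0 < PySem.List.pyGetD a i 0) ∨
         (PySem.List.pyGetD a i 0 < PySem.List.pyGetD a (i - 1) 0 ∧
            PySem.List.pyGetD a i 0 < PySem.List.pyGetD a (i + 1) 0)
      then i else best)
      = (fun (best i : Int) => if Q a i then i else best) := by
    funext best i
    simp [Q]
  rw [hfun, foldl_pick (Q a), List.reverse_reverse]

lemma B_eq_spec : ∀ a : List Int, arg_first_extr_alt a = specF a := by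
  intro a
  induction a with
  | nil => simp [arg_first_extr_alt, specF]
  | cons x l ih =>
    match l, ih with
    | [], _ => simp [arg_first_extr_alt, specF]
    | [y], _ =>
      rw [B_find [x, y] (by simp), PySem.List.pyRange_one_eq_nil (by norm_num)]
      simp [specF]
    | y :: z :: rest, ih =>
      have hn : (((x :: y :: z :: rest).length : Int)) = (rest.length : Int) + 3 := by
        simp; ring
      rw [B_find _ (by simp), hn,
        show (rest.length : Int) + 3 - 1 = (rest.length : Int) + 2 by ring]
      rw [PySem.List.pyRange_one_cons (by omega), List.find?_cons]
      have hQ1 : Q (x :: y :: z :: rest) 1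
          = decide ((x < y ∧ z < y) ∨ (y < x ∧ y < z)) := by
        unfold Q
        norm_num [PySem.List.pyGetD_ofNat']
      have hshift := find_shift x (y :: z :: rest) rest.length 1 (by omega)
      rw [show (1 : Int) + 1 + (rest.length : Int) = (rest.length : Int) + 2 by ring,
        show (1 : Int) + (rest.length : Int) = (rest.length : Int) + 1 by ring] at hshift
      simp only [specF]
      by_cases hc : (x < y ∧ z < y) ∨ (y < x ∧ y < z)
      · rw [hQ1, decide_eq_true hc]
        simp [hc]
      · rw [hQ1, decide_eq_false hc]
        simp only [if_neg hc]
        rw [← ih, B_find (y :: z :: rest) (by simp),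
          show (((y :: z :: rest).length : Int)) = (rest.length : Int) + 2 by
            simp; ring,
          show (rest.length : Int) + 2 - 1 = (rest.length : Int) + 1 by ring]
        rw [hshift]
        cases hf : (PySem.List.pyRange 1 ((rest.length : Int) + 1) 1).find?
            (Q (y :: z :: rest)) with
        | some j => simp
        | none => simp; ring

-- ===== VERDICT =====
theorem arg_first_extr_spec : Claim_equal_arg_first_extr := by
  intro a _
  unfold Spec_arg_first_extr
  rw [A_eq_spec, B_eq_spec]
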